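-- pv_equiv track=rewrite | github.com/JAMM-JAMM/algorithm-study | programmers/etc/위클리 챌린지 1주차.py | solution
-- ===== SOURCE A (Python) =====
-- def solution(price, money, count):
--
--     total = 0
--
--     for i in range(1, count+1):
--         total += price*i
--
--     result = total - money
--
--     if result <= 0:
--         return 0
--     else:
--         return result
-- ===== SOURCE B (Python) =====
-- def solution(price, money, count):
--     n = count if count > 0 else 0
--     result = price * n * (n + 1) // 2 - money
--     return result if result > 0 else 0
-- ===== Notes on version B (the rewrite author's own statement) =====
-- stated objective: faster
-- what changed: Replaces the O(count) accumulation loop with the arithmetic-series closed form price*n*(n+1)//2 (n = max(count,0)).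
import Mathlib
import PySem

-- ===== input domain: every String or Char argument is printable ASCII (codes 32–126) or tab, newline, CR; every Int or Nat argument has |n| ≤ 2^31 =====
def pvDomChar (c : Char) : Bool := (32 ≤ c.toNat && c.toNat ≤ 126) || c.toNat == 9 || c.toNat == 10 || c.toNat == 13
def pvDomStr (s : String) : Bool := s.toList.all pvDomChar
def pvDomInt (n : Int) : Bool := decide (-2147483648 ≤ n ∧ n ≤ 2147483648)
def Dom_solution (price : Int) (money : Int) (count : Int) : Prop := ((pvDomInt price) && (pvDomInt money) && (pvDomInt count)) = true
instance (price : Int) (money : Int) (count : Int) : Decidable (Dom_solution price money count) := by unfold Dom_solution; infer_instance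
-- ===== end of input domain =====

-- B replaces A's O(count) accumulation loop with the closed form price*n*(n+1)//2 (n = max(count,0)): asymptotically faster.


-- ===== PORT A =====
def solution (price : Int) (money : Int) (count : Int) : Int :=
  let total : Int := (PySem.List.pyRange 1 (count + 1) 1).foldl (fun total i => total + price * i) 0
  let result := total - money
  if result ≤ 0 then 0 else result

-- ===== PORT B =====
def solution_alt (price : Int) (money : Int) (count : Int) : Int :=
  let n : Int := if count > 0 then count else 0
  let result := PySem.Int.floordiv (price * n * (n + 1)) 2 - money
  if result > 0 then result else 0

-- ===== PRECONDITION & SPEC =====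
def Spec_solution (price : Int) (money : Int) (count : Int) (out : Int) : Prop := out = solution_alt price money count
instance (price : Int) (money : Int) (count : Int) (out : Int) : Decidable (Spec_solution price money count out) := by unfold Spec_solution; infer_instance

-- ===== CLAIM (what is proved, stated in full; the proofs are below) =====
def Claim_equal_solution : Prop := ∀ (price : Int) (money : Int) (count : Int), Dom_solution price money count → Spec_solution price money count (solution price money count)

-- ===== LEMMAS AND PROOFS =====

theorem twice_sum (price : Int) : ∀ n : Nat,
    2 * ((PySem.List.pyRange 1 ((n : Int) + 1) 1).foldl (fun total i => total + price * i) 0)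
      = price * (n : Int) * ((n : Int) + 1) := by
  intro n
  induction n with
  | zero =>
      rw [PySem.List.pyRange_one_eq_nil (by norm_num)]
      simp
  | succ k ih =>
      have hcast : (((k : Nat) + 1 : Nat) : Int) + 1 = ((k : Int) + 1) + 1 := by push_cast; ring
      rw [hcast, PySem.List.pyRange_one_succ_right (a := 1) (b := (k : Int) + 1) (by omega),
        List.foldl_append]
      simp only [List.foldl]
      push_cast
      linear_combination ih

theorem sum_closed (price : Int) (count : Int) :
    (PySem.List.pyRange 1 (count + 1) 1).foldl (fun total i => total + price * i) 0
      = PySem.Int.floordiv (price * (if count > 0 then count else 0) * ((if count > 0 then count else 0) + 1)) 2 := by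
  by_cases h : count > 0
  · simp only [if_pos h]
    have hc : ((count.toNat : Int)) = count := Int.toNat_of_nonneg (by omega)
    have := twice_sum price count.toNat
    rw [hc] at this
    rw [← this, PySem.Int.floordiv_eq_ediv_of_pos (by norm_num), Int.mul_ediv_cancel_left _ (by norm_num : (2:Int) ≠ 0)]
  · simp only [if_neg h]
    rw [PySem.List.pyRange_one_eq_nil (by omega)]
    simp [PySem.Int.floordiv]

-- ===== VERDICT (by name: the statement is the Claim_ definition above) =====
theorem solution_spec : Claim_equal_solution := by
  intro price money count _
  unfold Spec_solution solution solution_alt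
  rw [sum_closed price count]
  simp only []
  split_ifs <;> omega
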